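-- pv_equiv track=rewrite | github.com/sayan1506/Video_Intelligence | Backend/models/schemas.py | progress_to_stage
-- ===== SOURCE A (Python) =====
-- PROGRESS_STAGES = {
--     0:   "Queued",
--     10:  "Uploading video...",
--     25:  "Queued for processing",
--     50:  "Transcribing audio...",
--     75:  "Detecting scenes...",
--     90:  "Generating summary...",
--     100: "Completed",
-- }
--
-- STAGE_FAILED = "Processing failed"
--
-- def progress_to_stage(progress: int, status: str = "pending") -> str:
--     """
--     Map a progress integer + status to a human-readable stage label.
--
--     Uses the closest stage that is <= the current progress value.
--     This means progress=60 maps to "Transcribing audio..." (stage 50),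
--     not "Detecting scenes..." (stage 75) — always shows the last
--     completed stage, not the next one.
--
--     Args:
--         progress: Integer 0–100.
--         status: Job status string — "failed" overrides the stage label.
--
--     Returns:
--         Human-readable stage string.
--     """
--     if status == "failed":
--         return STAGE_FAILED
--
--     if status == "completed" or progress >= 100:
--         return PROGRESS_STAGES[100]
--
--     # Find the highest stage key that is <= current progress
--     applicable = [k for k in PROGRESS_STAGES if k <= progress]
--     if not applicable:
--         return PROGRESS_STAGES[0]
--
--     return PROGRESS_STAGES[max(applicable)]
-- ===== SOURCE B (Python) =====
-- import bisect
--
-- PROGRESS_STAGES = {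
--     0:   "Queued",
--     10:  "Uploading video...",
--     25:  "Queued for processing",
--     50:  "Transcribing audio...",
--     75:  "Detecting scenes...",
--     90:  "Generating summary...",
--     100: "Completed",
-- }
--
-- STAGE_FAILED = "Processing failed"
--
-- _KEYS = sorted(PROGRESS_STAGES)
-- _LABELS = [PROGRESS_STAGES[k] for k in _KEYS]
--
-- def progress_to_stage(progress: int, status: str = "pending") -> str:
--     if status == "failed":
--         return STAGE_FAILED
--     if status == "completed" or progress >= 100:
--         return _LABELS[-1]
--     i = bisect.bisect_right(_KEYS, progress) - 1
--     return _LABELS[max(i, 0)]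
-- ===== Notes on version B (the rewrite author's own statement) =====
-- stated objective: idiomatic
-- what changed: Replaces A's per-call filter of all dict keys followed by max() with a module-level sorted key list and parallel label list, looked up via bisect.bisect_right with a max(i,0) floor for below-zero progress.
import Mathlib
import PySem

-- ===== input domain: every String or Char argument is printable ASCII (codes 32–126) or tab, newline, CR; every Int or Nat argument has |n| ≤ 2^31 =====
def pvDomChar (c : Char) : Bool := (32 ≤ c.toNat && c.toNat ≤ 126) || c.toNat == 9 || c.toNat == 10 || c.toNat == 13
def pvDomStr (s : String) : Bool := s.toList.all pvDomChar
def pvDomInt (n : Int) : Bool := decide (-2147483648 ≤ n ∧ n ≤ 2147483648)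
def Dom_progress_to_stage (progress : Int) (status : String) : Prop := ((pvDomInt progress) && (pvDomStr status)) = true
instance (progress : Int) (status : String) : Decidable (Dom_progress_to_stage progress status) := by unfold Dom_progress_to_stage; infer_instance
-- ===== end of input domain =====

-- B replaces A's filter-then-max linear scan with a prebuilt sorted key list,
-- a parallel label list, and a bisect_right lookup (objective: idiomatic).

-- ===== PORT A =====
def PROGRESS_STAGES : PySem.Dict Int String :=
  PySem.Dict.ofList [(0, "Queued"), (10, "Uploading video..."), (25, "Queued for processing"),
    (50, "Transcribing audio..."), (75, "Detecting scenes..."), (90, "Generating summary..."),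
    (100, "Completed")]

def STAGE_FAILED : String := "Processing failed"

def progress_to_stage (progress : Int) (status : String) : String :=
  if status == "failed" then STAGE_FAILED
  else if status == "completed" || progress ≥ 100 then PROGRESS_STAGES.getD 100 ""
  else
    -- applicable = [k for k in PROGRESS_STAGES if k <= progress]
    let applicable := (PySem.Dict.keys PROGRESS_STAGES).filter (fun k => k ≤ progress)
    if applicable = [] then PROGRESS_STAGES.getD 0 ""
    else
      -- PROGRESS_STAGES[max(applicable)]; the key max(applicable) is always present,
      -- so Python never raises KeyError here; getD "" is exact.
      match PySem.List.max? applicable (fun k => k) with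
      | some m => PROGRESS_STAGES.getD m ""
      | none => ""

-- ===== PORT B =====
def bKeys : List Int := [0, 10, 25, 50, 75, 90, 100]
def bLabels : List String :=
  ["Queued", "Uploading video...", "Queued for processing", "Transcribing audio...",
   "Detecting scenes...", "Generating summary...", "Completed"]

def progress_to_stage_alt (progress : Int) (status : String) : String :=
  if status == "failed" then "Processing failed"
  else if status == "completed" || progress ≥ 100 then
    (PySem.List.pyGet? bLabels (-1)).getD ""   -- _LABELS[-1]; list nonempty, exact
  else
    let i : Int := (PySem.List.bisectRight bKeys progress : Int) - 1
    (PySem.List.pyGet? bLabels (max i 0)).getD ""   -- _LABELS[max(i, 0)]; index always in range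

-- ===== PRECONDITION & SPEC =====
def Spec_progress_to_stage (progress : Int) (status : String) (out : String) : Prop := out = progress_to_stage_alt progress status
instance (progress : Int) (status : String) (out : String) : Decidable (Spec_progress_to_stage progress status out) := by unfold Spec_progress_to_stage; infer_instance

-- ===== CLAIM (what is proved, stated in full; the proofs are below) =====
def Claim_equal_progress_to_stage : Prop := ∀ (progress : Int) (status : String), Dom_progress_to_stage progress status → Spec_progress_to_stage progress status (progress_to_stage progress status)

-- ===== LEMMAS AND PROOFS =====

-- The non-special-status core: both programs are piecewise constant in progress
-- with breakpoints at the seven stage keys; compare them range by range.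
theorem pv_core_eq (p : Int) (hp : p < 100) (s : String)
    (hf : (s == "failed") = false) (hc : (s == "completed") = false) :
    progress_to_stage p s = progress_to_stage_alt p s := by
  by_cases h0 : p < 0
  · simp [progress_to_stage, progress_to_stage_alt, PROGRESS_STAGES, bKeys, bLabels,
          PySem.Dict.keys, PySem.Dict.getD, PySem.Dict.get?, PySem.Dict.ofList, PySem.Dict.update,
          PySem.Dict.empty, PySem.Dict.insert, PySem.Dict.contains,
          List.foldl, PySem.List.bisectRightLoop,
          PySem.List.bisectRight, PySem.List.pyGet?, PySem.List.pyIdx?, hf, hc,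
          List.filter,
          show ¬(0 ≤ p) from by omega,
          show ¬(10 ≤ p) from by omega,
          show ¬(25 ≤ p) from by omega,
          show ¬(50 ≤ p) from by omega,
          show ¬(75 ≤ p) from by omega,
          show ¬(90 ≤ p) from by omega,
          show p < 50 from by omega,
          show p < 10 from by omega,
          show p < 0 from by omega,
          show ¬(100 ≤ p) from by omega]
  · by_cases h10 : p < 10
    · simp [progress_to_stage, progress_to_stage_alt, PROGRESS_STAGES, bKeys, bLabels,
            PySem.Dict.keys, PySem.Dict.getD, PySem.Dict.get?, PySem.Dict.ofList, PySem.Dict.update,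
            PySem.Dict.empty, PySem.Dict.insert, PySem.Dict.contains,
            List.foldl, PySem.List.bisectRightLoop,
            PySem.List.max?, PySem.List.bisectRight, PySem.List.pyGet?, PySem.List.pyIdx?, hf, hc,
            List.filter,
            show (0 : Int) ≤ p from by omega,
            show ¬(10 ≤ p) from by omega,
            show ¬(25 ≤ p) from by omega,
            show ¬(50 ≤ p) from by omega,
            show ¬(75 ≤ p) from by omega,
            show ¬(90 ≤ p) from by omega,
            show p < 50 from by omega,
            show p < 10 from by omega,
            show ¬(p < 0) from by omega,
            show ¬(100 ≤ p) from by omega]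
    · by_cases h25 : p < 25
      · simp [progress_to_stage, progress_to_stage_alt, PROGRESS_STAGES, bKeys, bLabels,
              PySem.Dict.keys, PySem.Dict.getD, PySem.Dict.get?, PySem.Dict.ofList, PySem.Dict.update,
              PySem.Dict.empty, PySem.Dict.insert, PySem.Dict.contains,
              List.find?, List.foldl, PySem.List.bisectRightLoop,
              PySem.List.max?, PySem.List.bisectRight, PySem.List.pyGet?, PySem.List.pyIdx?, hf, hc,
              List.filter,
              show (0 : Int) ≤ p from by omega,
              show (10 : Int) ≤ p from by omega,
              show ¬(25 ≤ p) from by omega,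
              show ¬(50 ≤ p) from by omega,
              show ¬(75 ≤ p) from by omega,
              show ¬(90 ≤ p) from by omega,
              show p < 50 from by omega,
              show ¬(p < 10) from by omega,
              show p < 25 from by omega,
              show ¬(100 ≤ p) from by omega]
      · by_cases h50 : p < 50
        · simp [progress_to_stage, progress_to_stage_alt, PROGRESS_STAGES, bKeys, bLabels,
                PySem.Dict.keys, PySem.Dict.getD, PySem.Dict.get?, PySem.Dict.ofList, PySem.Dict.update,
                PySem.Dict.empty, PySem.Dict.insert, PySem.Dict.contains,
                List.find?, List.foldl, PySem.List.bisectRightLoop,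
                PySem.List.max?, PySem.List.bisectRight, PySem.List.pyGet?, PySem.List.pyIdx?, hf, hc,
                List.filter,
                show (0 : Int) ≤ p from by omega,
                show (10 : Int) ≤ p from by omega,
                show (25 : Int) ≤ p from by omega,
                show ¬(50 ≤ p) from by omega,
                show ¬(75 ≤ p) from by omega,
                show ¬(90 ≤ p) from by omega,
                show p < 50 from by omega,
                show ¬(p < 10) from by omega,
                show ¬(p < 25) from by omega,
                show ¬(100 ≤ p) from by omega]
        · by_cases h75 : p < 75
          · simp [progress_to_stage, progress_to_stage_alt, PROGRESS_STAGES, bKeys, bLabels,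
                  PySem.Dict.keys, PySem.Dict.getD, PySem.Dict.get?, PySem.Dict.ofList, PySem.Dict.update,
                  PySem.Dict.empty, PySem.Dict.insert, PySem.Dict.contains,
                  List.find?, List.foldl, PySem.List.bisectRightLoop,
                  PySem.List.max?, PySem.List.bisectRight, PySem.List.pyGet?, PySem.List.pyIdx?, hf, hc,
                  List.filter,
                  show (0 : Int) ≤ p from by omega,
                  show (10 : Int) ≤ p from by omega,
                  show (25 : Int) ≤ p from by omega,
                  show (50 : Int) ≤ p from by omega,
                  show ¬(75 ≤ p) from by omega,
                  show ¬(90 ≤ p) from by omega,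
                  show ¬(p < 50) from by omega,
                  show p < 90 from by omega,
                  show p < 75 from by omega,
                  show ¬(100 ≤ p) from by omega]
          · by_cases h90 : p < 90
            · simp [progress_to_stage, progress_to_stage_alt, PROGRESS_STAGES, bKeys, bLabels,
                    PySem.Dict.keys, PySem.Dict.getD, PySem.Dict.get?, PySem.Dict.ofList, PySem.Dict.update,
                    PySem.Dict.empty, PySem.Dict.insert, PySem.Dict.contains,
                    List.find?, List.foldl, PySem.List.bisectRightLoop,
                    PySem.List.max?, PySem.List.bisectRight, PySem.List.pyGet?, PySem.List.pyIdx?, hf, hc,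
                    List.filter,
                    show (0 : Int) ≤ p from by omega,
                    show (10 : Int) ≤ p from by omega,
                    show (25 : Int) ≤ p from by omega,
                    show (50 : Int) ≤ p from by omega,
                    show (75 : Int) ≤ p from by omega,
                    show ¬(90 ≤ p) from by omega,
                    show ¬(p < 50) from by omega,
                    show p < 90 from by omega,
                    show ¬(p < 75) from by omega,
                    show ¬(100 ≤ p) from by omega]
            · simp [progress_to_stage, progress_to_stage_alt, PROGRESS_STAGES, bKeys, bLabels,
                    PySem.Dict.keys, PySem.Dict.getD, PySem.Dict.get?, PySem.Dict.ofList, PySem.Dict.update,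
                    PySem.Dict.empty, PySem.Dict.insert, PySem.Dict.contains,
                    List.find?, List.foldl, PySem.List.bisectRightLoop,
                    PySem.List.max?, PySem.List.bisectRight, PySem.List.pyGet?, PySem.List.pyIdx?, hf, hc,
                    List.filter,
                    show (0 : Int) ≤ p from by omega,
                    show (10 : Int) ≤ p from by omega,
                    show (25 : Int) ≤ p from by omega,
                    show (50 : Int) ≤ p from by omega,
                    show (75 : Int) ≤ p from by omega,
                    show (90 : Int) ≤ p from by omega,
                    show ¬(p < 50) from by omega,
                    show ¬(p < 90) from by omega,
                    show p < 100 from by omega,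
                    show ¬(100 ≤ p) from by omega]

-- ===== VERDICT (by name: the statement is the Claim_ definition above) =====
theorem progress_to_stage_spec : Claim_equal_progress_to_stage := by
  intro p s _
  unfold Spec_progress_to_stage
  by_cases hf : s = "failed"
  · simp [progress_to_stage, progress_to_stage_alt, hf, STAGE_FAILED]
  · by_cases hc : s = "completed"
    · simp [progress_to_stage, progress_to_stage_alt, hc, PROGRESS_STAGES,
        PySem.Dict.getD, PySem.Dict.get?, PySem.Dict.ofList, PySem.Dict.update,
        PySem.Dict.empty, PySem.Dict.insert, PySem.Dict.contains,
        List.find?, bLabels, PySem.List.pyGet?, PySem.List.pyIdx?]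
    · by_cases hp : p ≥ 100
      · simp [progress_to_stage, progress_to_stage_alt, hp, hf, PROGRESS_STAGES,
          PySem.Dict.getD, PySem.Dict.get?, PySem.Dict.ofList, PySem.Dict.update,
          PySem.Dict.empty, PySem.Dict.insert, PySem.Dict.contains,
          List.find?, bLabels, PySem.List.pyGet?, PySem.List.pyIdx?]
      · exact pv_core_eq p (by omega) s (by simp [hf]) (by simp [hc])
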